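-- pv_equiv track=rewrite | github.com/MitchellZH/Week4day3 | whiteboard.py | pair_gloves
-- ===== SOURCE A (Python) =====
-- def pair_gloves(gloves):
--     new_list = {}
--     count = 0
--     for glove in gloves:
--         if glove not in new_list:
--             new_list[glove] = 1
--         else:
--             new_list[glove] += 1
--
--     for v in new_list.values():
--         if v % 2 == 0:
--           count += v//2
--     return count
-- ===== SOURCE B (Python) =====
-- def pair_gloves(gloves):
--     total = 0
--     run = 0
--     prev = None
--     for color in sorted(gloves):
--         if color == prev:
--             run += 1
--         else:
--             if run % 2 == 0:
--                 total += run // 2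
--             run = 1
--             prev = color
--     if run % 2 == 0:
--         total += run // 2
--     return total
-- ===== Notes on version B (the rewrite author's own statement) =====
-- stated objective: alternative
-- what changed: B sorts a copy of the list and scans maximal runs of equal colors, adding n//2 for each even-length run, instead of building a hash-map of counts and summing over its values.
import Mathlib
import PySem

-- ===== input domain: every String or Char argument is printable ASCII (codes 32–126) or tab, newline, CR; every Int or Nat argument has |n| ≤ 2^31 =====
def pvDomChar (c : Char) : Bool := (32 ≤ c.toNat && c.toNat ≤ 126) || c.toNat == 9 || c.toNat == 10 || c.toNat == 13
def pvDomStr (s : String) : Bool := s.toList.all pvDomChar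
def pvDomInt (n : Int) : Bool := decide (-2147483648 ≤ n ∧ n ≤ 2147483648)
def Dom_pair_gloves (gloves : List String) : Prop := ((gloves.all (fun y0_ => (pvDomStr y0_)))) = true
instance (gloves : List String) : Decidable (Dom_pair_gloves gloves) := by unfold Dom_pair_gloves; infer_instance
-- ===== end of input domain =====

-- B sorts a copy of the input and scans maximal runs of equal colors in one pass instead of building a dict of counts (alternative decomposition; return values proved equal).


-- ===== PORT A =====
def pair_gloves (gloves : List String) : Int :=
  let new_list : PySem.Dict String Int := gloves.foldl (fun new_list glove =>
    if !(new_list.contains glove) then new_list.insert glove 1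
    else new_list.modify glove 0 (· + 1)) PySem.Dict.empty
  (PySem.Dict.values new_list).foldl (fun count v =>
    if PySem.Int.mod v 2 == 0 then count + PySem.Int.floordiv v 2 else count) 0

-- ===== PORT B =====
-- loop state of Source B: (total, run, prev); prev is None before the first element
def pvStep (st : Int × Int × Option String) (color : String) : Int × Int × Option String :=
  if some color == st.2.2 then (st.1, st.2.1 + 1, st.2.2)   -- `color == prev` (None equals no string)
  else ((if PySem.Int.mod st.2.1 2 == 0 then st.1 + PySem.Int.floordiv st.2.1 2 else st.1), 1, some color)

def pair_gloves_alt (gloves : List String) : Int :=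
  let st := (PySem.List.sorted gloves (fun x => x) false).foldl pvStep (0, 0, none)
  if PySem.Int.mod st.2.1 2 == 0 then st.1 + PySem.Int.floordiv st.2.1 2 else st.1

-- ===== PRECONDITION & SPEC =====
def Spec_pair_gloves (gloves : List String) (out : Int) : Prop := out = pair_gloves_alt gloves
instance (gloves : List String) (out : Int) : Decidable (Spec_pair_gloves gloves out) := by unfold Spec_pair_gloves; infer_instance

-- ===== CLAIM (what is proved, stated in full; the proofs are below) =====
def Claim_equal_pair_gloves : Prop := ∀ (gloves : List String), Dom_pair_gloves gloves → Spec_pair_gloves gloves (pair_gloves gloves)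

-- ===== LEMMAS AND PROOFS =====
-- pairs contributed by one color counted n times (A's second loop body / B's run flush)
def gpair (n : Int) : Int := if PySem.Int.mod n 2 == 0 then PySem.Int.floordiv n 2 else 0

-- the common characterisation: sum of gpair over the counts of the distinct colors
def pgSum (s : List String) : Int := ((PySem.List.dedup s).map (fun k => gpair ((s.count k : Nat) : Int))).sum

theorem pair_gloves_eq_pgSum (gloves : List String) : pair_gloves gloves = pgSum gloves := by
  unfold pair_gloves
  have hd : (gloves.foldl (fun nl glove =>
      if !(nl.contains glove) then nl.insert glove 1
      else nl.modify glove 0 (· + 1)) PySem.Dict.empty) = PySem.Dict.counter gloves := by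
    rw [PySem.Dict.counter_eq_foldl]
    congr 1
    funext nl glove
    by_cases h : nl.contains glove = true
    · simp [h]
    · simp only [Bool.not_eq_true] at h
      simp [h, PySem.Dict.insert, PySem.Dict.modify]
      exact PySem.Dict.getD_of_not_contains nl 0 h
  rw [hd]
  show (List.foldl _ 0 (PySem.Dict.counter gloves).values) = _
  have hv : (PySem.Dict.counter gloves).values = (PySem.List.dedup gloves).map (fun k => ((gloves.count k : Nat) : Int)) := by
    simp only [PySem.Dict.values, PySem.Dict.items_counter, List.map_map, PySem.List.dedup_eq_ofList]
    rfl
  rw [hv]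
  have hf : ∀ (xs : List Int), xs.foldl (fun count v =>
      if PySem.Int.mod v 2 == 0 then count + PySem.Int.floordiv v 2 else count) 0
      = xs.foldl (fun a x => a + gpair x) 0 := by
    intro xs; congr 1; funext a x; unfold gpair; split <;> simp
  rw [hf, PySem.List.foldl_add]
  simp [pgSum, List.map_map]
  rfl

theorem pgSum_perm {s t : List String} (h : s.Perm t) : pgSum s = pgSum t := by
  have hd : (PySem.List.dedup s).Perm (PySem.List.dedup t) :=
    (List.perm_ext_iff_of_nodup (PySem.List.nodup_dedup s) (PySem.List.nodup_dedup t)).mpr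
      (fun a => by simp [h.mem_iff])
  have hc : (fun k => gpair ((s.count k : Nat) : Int)) = (fun k => gpair ((t.count k : Nat) : Int)) := by
    funext k; rw [h.count_eq]
  unfold pgSum
  rw [hc]
  exact (hd.map _).sum_eq

-- one maximal run: all of t equals x and x does not occur afterwards
theorem pgSum_cons_run (x : String) (t rest : List String)
    (ht : ∀ y ∈ t, y = x) (hx : x ∉ rest) :
    pgSum (x :: (t ++ rest)) = gpair ((1 + t.length : Nat) : Int) + pgSum rest := by
  have hcx : (x :: (t ++ rest)).count x = 1 + t.length := by
    rw [List.count_cons_self, List.count_append, List.count_eq_length.mpr (fun b hb => by simp [ht b hb]),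
      List.count_eq_zero.mpr hx]
    omega
  have hperm : (PySem.List.dedup (x :: (t ++ rest))).Perm (x :: PySem.List.dedup rest) := by
    refine (List.perm_ext_iff_of_nodup (PySem.List.nodup_dedup _) ?_).mpr ?_
    · exact List.nodup_cons.mpr ⟨by simp [hx], PySem.List.nodup_dedup _⟩
    · intro a
      simp only [PySem.List.mem_dedup, List.mem_cons, List.mem_append]
      constructor
      · rintro (rfl | h | h)
        · exact Or.inl rfl
        · exact Or.inl (ht a h)
        · exact Or.inr h
      · rintro (rfl | h)
        · exact Or.inl rfl
        · exact Or.inr (Or.inr h)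
  unfold pgSum
  rw [(hperm.map _).sum_eq, List.map_cons, List.sum_cons, hcx]
  congr 1
  refine congrArg List.sum (List.map_congr_left ?_)
  intro k hk
  have hkr : k ∈ rest := (PySem.List.mem_dedup _ _).mp hk
  have hkx : k ≠ x := fun h => hx (h ▸ hkr)
  have : (x :: (t ++ rest)).count k = rest.count k := by
    have h0 : t.count k = 0 := List.count_eq_zero.mpr (fun hkt => hkx (ht k hkt))
    simp [Ne.symm hkx, List.count_append, h0]
  rw [this]

-- Source B's run flush written with gpair
theorem pvFlush_eq (total run : Int) :
    (if PySem.Int.mod run 2 == 0 then total + PySem.Int.floordiv run 2 else total) = total + gpair run := by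
  unfold gpair; split <;> simp

theorem run_all_eq (x : String) (s : List String) : ∀ y ∈ s.takeWhile (· == x), y = x := by
  intro y hy
  have := List.mem_takeWhile_imp hy
  simpa using this

-- on a sorted tail the color is gone after its run
theorem run_notin (x : String) (s : List String) (hp : (x :: s).Pairwise (· ≤ ·)) :
    x ∉ s.dropWhile (· == x) := by
  have hxall : ∀ y ∈ s, x ≤ y := (List.pairwise_cons.mp hp).1
  have hrp : (s.dropWhile (· == x)).Pairwise (· ≤ ·) :=
    (List.pairwise_cons.mp hp).2.sublist (List.dropWhile_sublist _)
  cases hr : s.dropWhile (· == x) with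
  | nil => simp
  | cons h' r' =>
      have hne : ¬ (h' == x) = true := by
        have hthis := List.head?_dropWhile_not (· == x) s
        rw [hr] at hthis
        simp at hthis
        simp [hthis]
      have hh' : h' ∈ s := (List.dropWhile_sublist _).mem (by rw [hr]; simp)
      have hlt : x < h' := lt_of_le_of_ne (hxall h' hh') (by simpa using fun e => hne (by simp [e]))
      intro hmem
      rcases List.mem_cons.mp hmem with rfl | hmem'
      · exact absurd rfl (ne_of_gt hlt)
      · have : h' ≤ x := by
          rw [hr] at hrp
          exact (List.pairwise_cons.mp hrp).1 x hmem'
        exact absurd (lt_of_lt_of_le hlt this) (lt_irrefl x)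

-- the fold skips over the current run of x, only incrementing the counter
theorem foldl_pvStep_run (x : String) : ∀ (s : List String) (total run : Int),
    s.foldl pvStep (total, run, some x) =
      (s.dropWhile (· == x)).foldl pvStep (total, run + ((s.takeWhile (· == x)).length : Int), some x) := by
  intro s
  induction s with
  | nil => intro total run; simp
  | cons r rest ih =>
      intro total run
      by_cases h : (r == x) = true
      · have hrx : r = x := by simpa using h
        subst hrx
        simp only [List.foldl_cons, List.takeWhile_cons, List.dropWhile_cons, h]
        rw [show pvStep (total, run, some r) r = (total, run + 1, some r) by simp [pvStep]]
        rw [ih total (run + 1)]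
        congr 2
        rw [Prod.mk.injEq]
        refine ⟨?_, rfl⟩
        simp only [if_true, List.length_cons]
        push_cast; ring
      · simp only [List.foldl_cons, List.takeWhile_cons, List.dropWhile_cons, h]
        simp

-- the final flush of Source B applied to a loop state (proof-side abbreviation)
def flushSt (st : Int × Int × Option String) : Int :=
  if PySem.Int.mod st.2.1 2 == 0 then st.1 + PySem.Int.floordiv st.2.1 2 else st.1

-- main invariant: mid-run at color x with counter `run`, on a sorted tail
theorem foldl_pvStep_eq_aux : ∀ (n : Nat) (s : List String), s.length ≤ n →
    ∀ (x : String), (x :: s).Pairwise (· ≤ ·) → ∀ (total run : Int),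
    flushSt (s.foldl pvStep (total, run, some x)) =
      (total + gpair (run + ((s.takeWhile (· == x)).length : Int))) + pgSum (s.dropWhile (· == x)) := by
  intro n
  induction n with
  | zero =>
      intro s hs x _ total run
      have : s = [] := List.eq_nil_of_length_eq_zero (Nat.le_zero.mp hs)
      subst this
      simp only [List.foldl_nil, List.takeWhile_nil, List.dropWhile_nil, flushSt]
      rw [pvFlush_eq]
      simp [pgSum, PySem.List.dedup]
  | succ n ih =>
      intro s hs x hp total run
      rw [foldl_pvStep_run]
      have hx := run_notin x s hp
      have hsp : s.Pairwise (· ≤ ·) := (List.pairwise_cons.mp hp).2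
      have hrp : (s.dropWhile (· == x)).Pairwise (· ≤ ·) := hsp.sublist (List.dropWhile_sublist _)
      cases hr : s.dropWhile (· == x) with
      | nil =>
          simp only [List.foldl_nil, flushSt]
          rw [pvFlush_eq]
          simp [pgSum, PySem.List.dedup]
      | cons r r' =>
          have hne : ¬ (r == x) = true := by
            have hthis := List.head?_dropWhile_not (· == x) s
            rw [hr] at hthis
            simp at hthis
            simp [hthis]
          have hrr : (r :: r').Pairwise (· ≤ ·) := hr ▸ hrp
          have hr'len : r'.length ≤ n := by
            have h1 := List.length_dropWhile_le (· == x) s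
            rw [hr] at h1
            simp only [List.length_cons] at h1
            omega
          simp only [List.foldl_cons]
          rw [show pvStep (total, run + ((s.takeWhile (· == x)).length : Int), some x) r
              = (total + gpair (run + ((s.takeWhile (· == x)).length : Int)), 1, some r) from by
            simp only [pvStep]
            rw [if_neg (by simpa using fun e => hne (by simp [e]))]
            rw [pvFlush_eq]]
          rw [ih r' hr'len r hrr (total + gpair (run + ((s.takeWhile (· == x)).length : Int))) 1]
          have hsplit : r :: r' = r :: ((r'.takeWhile (· == r)) ++ (r'.dropWhile (· == r))) := by
            rw [List.takeWhile_append_dropWhile]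
          rw [show pgSum (r :: r') = gpair ((1 + (r'.takeWhile (· == r)).length : Nat) : Int) + pgSum (r'.dropWhile (· == r)) from by
            rw [hsplit]
            exact pgSum_cons_run r _ _ (run_all_eq r r') (run_notin r r' hrr)]
          have hcast : ((1 + (r'.takeWhile (· == r)).length : Nat) : Int) = 1 + ((r'.takeWhile (· == r)).length : Int) := by
            push_cast; ring
          rw [hcast]
          ring

-- ===== VERDICT (by name: the statement is the Claim_ definition above) =====
theorem pair_gloves_spec : Claim_equal_pair_gloves := by
  intro gloves _
  show pair_gloves gloves = pair_gloves_alt gloves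
  rw [pair_gloves_eq_pgSum, pgSum_perm (PySem.List.sorted_perm gloves (fun x => x) false).symm]
  show pgSum (PySem.List.sorted gloves (fun x => x) false)
    = flushSt ((PySem.List.sorted gloves (fun x => x) false).foldl pvStep (0, 0, none))
  have hp : (PySem.List.sorted gloves (fun x => x) false).Pairwise (· ≤ ·) := by
    simpa using PySem.List.sorted_pairwise gloves (fun x => x)
  cases hS : PySem.List.sorted gloves (fun x => x) false with
  | nil => simp [pgSum, PySem.List.dedup, flushSt]
  | cons x xs =>
      rw [hS] at hp
      simp only [List.foldl_cons]
      rw [show pvStep (0, 0, none) x = (0, 1, some x) from by simp [pvStep]]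
      rw [foldl_pvStep_eq_aux xs.length xs le_rfl x hp 0 1]
      have hsplit : x :: xs = x :: ((xs.takeWhile (· == x)) ++ (xs.dropWhile (· == x))) := by
        rw [List.takeWhile_append_dropWhile]
      rw [show pgSum (x :: xs) = gpair ((1 + (xs.takeWhile (· == x)).length : Nat) : Int) + pgSum (xs.dropWhile (· == x)) from by
        rw [hsplit]
        exact pgSum_cons_run x _ _ (run_all_eq x xs) (run_notin x xs hp)]
      have hcast : ((1 + (xs.takeWhile (· == x)).length : Nat) : Int) = 1 + ((xs.takeWhile (· == x)).length : Int) := by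
        push_cast; ring
      rw [hcast]
      ring
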